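-- pv_equiv track=rewrite | github.com/starfishwrx/- | browser_auth_refresh.py | _cookie_matches_domain
-- ===== SOURCE A (Python) =====
-- from typing import Any, Dict, Iterable, List, Optional, Sequence
--
-- def _cookie_matches_domain(cookie_domain: str, targets: Iterable[str]) -> bool:
--     domain = str(cookie_domain or "").lstrip(".").lower()
--     if not domain:
--         return False
--     for target in targets:
--         t = str(target or "").lstrip(".").lower()
--         if not t:
--             continue
--         if domain == t or domain.endswith("." + t):
--             return True
--     return False
-- ===== SOURCE B (Python) =====
-- def _cookie_matches_domain(cookie_domain, targets):
--     domain = str(cookie_domain or "").lstrip(".").lower()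
--     if not domain:
--         return False
--     # candidate strings a target may equal: the domain itself and every
--     # suffix starting right after a '.'
--     candidates = {domain}
--     for i, ch in enumerate(domain):
--         if ch == '.':
--             candidates.add(domain[i + 1:])
--     for target in targets:
--         t = str(target or "").lstrip(".").lower()
--         if t and t in candidates:
--             return True
--     return False
-- ===== Notes on version B (the rewrite author's own statement) =====
-- stated objective: alternative
-- what changed: Instead of testing domain == t or domain.endswith('.'+t) for every target, B precomputes once the set of dot-suffixes of the cookie domain and answers each target by a single set-membership lookup.
import Mathlib
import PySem

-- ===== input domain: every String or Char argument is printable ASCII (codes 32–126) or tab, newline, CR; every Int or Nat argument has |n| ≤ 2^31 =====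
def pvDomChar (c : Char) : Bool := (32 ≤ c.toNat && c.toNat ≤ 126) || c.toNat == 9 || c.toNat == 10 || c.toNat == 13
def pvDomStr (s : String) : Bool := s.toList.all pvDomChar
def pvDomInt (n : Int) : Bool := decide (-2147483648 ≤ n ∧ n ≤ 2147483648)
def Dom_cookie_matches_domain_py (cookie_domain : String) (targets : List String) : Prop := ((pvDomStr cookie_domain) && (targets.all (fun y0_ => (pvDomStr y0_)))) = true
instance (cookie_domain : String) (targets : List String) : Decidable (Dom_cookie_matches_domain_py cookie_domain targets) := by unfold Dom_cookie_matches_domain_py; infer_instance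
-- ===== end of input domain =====

-- B replaces the per-target endswith test by one precomputed set of dot-suffixes
-- of the cookie domain plus a membership lookup per target (alternative decomposition).

-- str(x or "").lstrip(".").lower(): 'x or ""' is x itself for a string (falsy only when empty,
-- and then "" = x); lstrip(".") is exactly dropWhile (· == '.'); lower via PySem.Chars.lower.
def pvNorm (s : String) : List Char :=
  PySem.Chars.lower (s.toList.dropWhile (fun c => c == '.'))

-- ===== PORT A =====
def pvALoop (domain : List Char) : List String → Bool
  | [] => false
  | target :: rest =>
    let t := pvNorm target
    if t = [] then pvALoop domain rest
    else if domain == t || PySem.Chars.endswith domain ('.' :: t) then true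
    else pvALoop domain rest

def cookie_matches_domain_py (cookie_domain : String) (targets : List String) : Bool :=
  let domain := pvNorm cookie_domain
  if domain = [] then false else pvALoop domain targets

-- ===== PORT B =====
def pvCandidates (domain : List Char) : PySem.Set (List Char) :=
  (PySem.List.enumerate domain 0).foldl
    (fun s p => if p.2 == '.' then PySem.Set.add s (PySem.List.slice domain (some (p.1 + 1)) none) else s)
    (PySem.Set.ofList [domain])

def pvBLoop (cands : PySem.Set (List Char)) : List String → Bool
  | [] => false
  | target :: rest =>
    let t := pvNorm target
    if t ≠ [] && PySem.Set.contains cands t then true else pvBLoop cands rest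

def cookie_matches_domain_py_alt (cookie_domain : String) (targets : List String) : Bool :=
  let domain := pvNorm cookie_domain
  if domain = [] then false else pvBLoop (pvCandidates domain) targets

-- ===== PRECONDITION & SPEC =====
def Spec_cookie_matches_domain_py (cookie_domain : String) (targets : List String) (out : Bool) : Prop := out = cookie_matches_domain_py_alt cookie_domain targets
instance (cookie_domain : String) (targets : List String) (out : Bool) : Decidable (Spec_cookie_matches_domain_py cookie_domain targets out) := by unfold Spec_cookie_matches_domain_py; infer_instance

-- ===== CLAIM (what is proved, stated in full; the proofs are below) =====
def Claim_equal_cookie_matches_domain_py : Prop := ∀ (cookie_domain : String) (targets : List String), Dom_cookie_matches_domain_py cookie_domain targets → Spec_cookie_matches_domain_py cookie_domain targets (cookie_matches_domain_py cookie_domain targets)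

-- ===== LEMMAS AND PROOFS =====

theorem pv_mem_foldl_add (domain : List Char) (l : List (Int × Char))
    (s0 : PySem.Set (List Char)) (t : List Char) :
    t ∈ l.foldl
      (fun s p => if p.2 == '.' then PySem.Set.add s (PySem.List.slice domain (some (p.1 + 1)) none) else s)
      s0
    ↔ t ∈ s0 ∨ ∃ p ∈ l, p.2 = '.' ∧ t = PySem.List.slice domain (some (p.1 + 1)) none := by
  induction l generalizing s0 with
  | nil => simp
  | cons hd tl ih =>
    simp only [List.foldl_cons]
    by_cases h : hd.2 = '.'
    · rw [if_pos (by simp [h]), ih, PySem.Set.mem_add]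
      constructor
      · rintro ((hs | rfl) | hp)
        · exact Or.inl hs
        · exact Or.inr ⟨hd, List.mem_cons_self, h, rfl⟩
        · rcases hp with ⟨p, hp, hd2, ht⟩
          exact Or.inr ⟨p, List.mem_cons_of_mem _ hp, hd2, ht⟩
      · rintro (hs | ⟨p, hp, hd2, ht⟩)
        · exact Or.inl (Or.inl hs)
        · rcases List.mem_cons.1 hp with rfl | hp
          · exact Or.inl (Or.inr ht)
          · exact Or.inr ⟨p, hp, hd2, ht⟩
    · rw [if_neg (by simp [h]), ih]
      constructor
      · rintro (hs | ⟨p, hp, hd2, ht⟩)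
        · exact Or.inl hs
        · exact Or.inr ⟨p, List.mem_cons_of_mem _ hp, hd2, ht⟩
      · rintro (hs | ⟨p, hp, hd2, ht⟩)
        · exact Or.inl hs
        · rcases List.mem_cons.1 hp with rfl | hp
          · exact absurd hd2 h
          · exact Or.inr ⟨p, hp, hd2, ht⟩

theorem pv_suffix_dot_iff (domain t : List Char) :
    ('.' :: t) <:+ domain ↔
    ∃ k, ∃ _ : k < domain.length, domain[k] = '.' ∧ t = domain.drop (k + 1) := by
  constructor
  · rintro ⟨pre, rfl⟩
    refine ⟨pre.length, by simp, ?_, ?_⟩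
    · simp
    · simp [List.drop_append]
  · rintro ⟨k, hk, hdot, rfl⟩
    refine ⟨domain.take k, ?_⟩
    rw [← hdot, List.getElem_cons_drop, List.take_append_drop]

theorem pv_contains_candidates (domain t : List Char) :
    PySem.Set.contains (pvCandidates domain) t
      = (domain == t || PySem.Chars.endswith domain ('.' :: t)) := by
  have hmem : t ∈ pvCandidates domain ↔
      t = domain ∨ ('.' :: t) <:+ domain := by
    unfold pvCandidates
    rw [pv_mem_foldl_add, pv_suffix_dot_iff]
    constructor
    · rintro (h | ⟨p, hp, hdot, rfl⟩)
      · left; simpa [PySem.Set.mem_ofList] using h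
      · right
        rcases (PySem.List.mem_enumerate_iff domain 0 p).1 hp with ⟨k, hk, rfl⟩
        refine ⟨k, hk, hdot, ?_⟩
        have : ((0 : Int) + k) + 1 = ((k + 1 : Nat) : Int) := by push_cast; ring
        rw [this, PySem.List.slice_from_natCast]
    · rintro (rfl | ⟨k, hk, hdot, rfl⟩)
      · left; simp [PySem.Set.mem_ofList]
      · right
        refine ⟨(0 + (k : Int), domain[k]),
          (PySem.List.mem_enumerate_iff domain 0 _).2 ⟨k, hk, rfl⟩, hdot, ?_⟩
        have : ((0 : Int) + k) + 1 = ((k + 1 : Nat) : Int) := by push_cast; ring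
        rw [this, PySem.List.slice_from_natCast]
  have hc : PySem.Set.contains (pvCandidates domain) t = true ↔ t ∈ pvCandidates domain := by
    simp [PySem.Set.contains]
  rw [Bool.eq_iff_iff, hc, hmem, Bool.or_eq_true, beq_iff_eq, PySem.Chars.endswith_iff]
  exact or_congr eq_comm Iff.rfl

theorem pv_loops_eq (domain : List Char) (targets : List String) :
    pvALoop domain targets = pvBLoop (pvCandidates domain) targets := by
  induction targets with
  | nil => rfl
  | cons target rest ih =>
    simp only [pvALoop, pvBLoop, pv_contains_candidates]
    by_cases ht : pvNorm target = []
    · simp [ht, ih]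
    · cases hc : (domain == pvNorm target || PySem.Chars.endswith domain ('.' :: pvNorm target)) with
      | true => simp [ht]
      | false => simp [ht, ih]

-- ===== VERDICT (by name: the statement is the Claim_ definition above) =====
theorem cookie_matches_domain_py_spec : Claim_equal_cookie_matches_domain_py := by
  intro cookie_domain targets _
  unfold Spec_cookie_matches_domain_py cookie_matches_domain_py cookie_matches_domain_py_alt
  by_cases h : pvNorm cookie_domain = []
  · simp [h]
  · simp [h, pv_loops_eq]
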